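-- pv_equiv track=rewrite | github.com/SteshinSS/lohi_splitter | src/lohi_splitter/min_vertex_k_cut.py | map_split_to_original_idx
-- ===== SOURCE A (Python) =====
-- def map_split_to_original_idx(split, k, new_nodes_to_old):
--     """
--     Maps partitioning of the nodes of the giant component, to nodes of
--     the original non-connected neighborhood graph.
--     """
--     partitions = []
--     for _ in range(k):
--         partitions.append([])
--
--     for S_idx, partition in enumerate(split):
--         if partition == -1:
--             continue
--         G_idx = new_nodes_to_old[S_idx]
--         partitions[partition].append(G_idx)
--     return partitions
-- ===== SOURCE B (Python) =====
-- def map_split_to_original_idx(split, k, new_nodes_to_old):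
--     """
--     Maps partitioning of the nodes of the giant component, to nodes of
--     the original non-connected neighborhood graph.
--     """
--     kept = [(p, new_nodes_to_old[i]) for i, p in enumerate(split) if p != -1]
--     return [[g for p, g in kept if p == part] for part in range(k)]
-- ===== Notes on version B (the rewrite author's own statement) =====
-- stated objective: alternative
-- what changed: B first builds the list of kept (partition, node) pairs with one comprehension and then builds each partition by a filtered scan of that list per partition index, instead of A's single dispatch pass appending into mutable buckets via (possibly negative) list indexing.
-- intended difference: On inputs where some split entry p lies in [-k,-2] and its position is a key of new_nodes_to_old (so A does not raise), A's negative list index wraps around and files the node into partition k+p, while B files nodes only under their literal partition number and drops such entries; -1 is the documented 'removed node' marker, so silently wrapping other negatives into an unrelated partition is an indexing artefact and B's behaviour is the intended one. — e.g. on map_split_to_original_idx([-2, 0], 2, [(0, 5), (1, 7)]): A returns [[5, 7], []], B returns [[7], []]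
import Mathlib
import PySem

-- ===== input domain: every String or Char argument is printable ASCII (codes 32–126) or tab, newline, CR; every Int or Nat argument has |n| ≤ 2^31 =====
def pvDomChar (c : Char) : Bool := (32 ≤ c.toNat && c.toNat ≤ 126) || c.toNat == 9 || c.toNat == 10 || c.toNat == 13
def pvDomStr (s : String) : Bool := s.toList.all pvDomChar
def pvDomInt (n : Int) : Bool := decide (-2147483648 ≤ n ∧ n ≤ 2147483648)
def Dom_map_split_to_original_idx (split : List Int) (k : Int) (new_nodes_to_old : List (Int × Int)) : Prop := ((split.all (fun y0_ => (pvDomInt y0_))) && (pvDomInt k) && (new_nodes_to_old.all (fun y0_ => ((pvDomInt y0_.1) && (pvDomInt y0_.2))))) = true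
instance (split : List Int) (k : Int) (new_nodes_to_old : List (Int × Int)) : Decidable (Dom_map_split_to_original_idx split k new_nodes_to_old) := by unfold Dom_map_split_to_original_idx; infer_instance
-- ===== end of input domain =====

-- B replaces A's single dispatch pass (append into partitions[p] via list indexing) by one
-- filtered scan of split per partition index; equivalence is proved outside D_ below
-- (entries in [-k,-2], where A's negative-index wraparound files the node into partition k+p).

-- ===== PORT A =====
-- one loop step of A's dispatch loop: skip -1, dict lookup, append into partitions[p]
-- (where the Python raises — KeyError on a missing key, IndexError on an out-of-range
-- partition — the PySem primitives return none / leave the list unchanged and the step skips)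
def pvStepA (d : PySem.Dict Int Int) (parts : List (List Int)) (ip : Int × Int) : List (List Int) :=
  if ip.2 = -1 then parts
  else
    match d.get? ip.1 with
    | none => parts   -- KeyError
    | some g => PySem.List.pySetD parts ip.2 (PySem.List.pyGetD parts ip.2 [] ++ [g])

def map_split_to_original_idx (split : List Int) (k : Int) (new_nodes_to_old : List (Int × Int)) : List (List Int) :=
  let d := PySem.Dict.ofList new_nodes_to_old
  let partitions := (PySem.List.pyRange 0 k 1).map (fun _ => ([] : List Int))
  (PySem.List.enumerate split 0).foldl (pvStepA d) partitions

-- ===== PORT B =====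
-- B's first comprehension: keep (partition, node) for every entry other than -1 (a missing
-- key, where the Python comprehension raises KeyError, yields none and the pair is dropped)
def pvKeep (d : PySem.Dict Int Int) (ip : Int × Int) : Option (Int × Int) :=
  if ip.2 ≠ -1 then (d.get? ip.1).map (fun g => (ip.2, g)) else none

def map_split_to_original_idx_alt (split : List Int) (k : Int) (new_nodes_to_old : List (Int × Int)) : List (List Int) :=
  let d := PySem.Dict.ofList new_nodes_to_old
  let kept := (PySem.List.enumerate split 0).filterMap (pvKeep d)
  (PySem.List.pyRange 0 k 1).map
    (fun part => kept.filterMap (fun pg => if pg.1 = part then some pg.2 else none))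

-- ===== PRECONDITION & SPEC =====
-- Pre_: exactly the inputs on which Python A returns: every split entry other than -1 has its
-- position as a key of new_nodes_to_old (else KeyError) and lies in [-k, k) (else IndexError).
def Pre_map_split_to_original_idx (split : List Int) (k : Int) (new_nodes_to_old : List (Int × Int)) : Prop :=
  ∀ ip ∈ PySem.List.enumerate split 0,
    ip.2 = -1 ∨ ((PySem.Dict.ofList new_nodes_to_old).contains ip.1 = true ∧ -k ≤ ip.2 ∧ ip.2 < k)
instance (split : List Int) (k : Int) (new_nodes_to_old : List (Int × Int)) : Decidable (Pre_map_split_to_original_idx split k new_nodes_to_old) := by unfold Pre_map_split_to_original_idx; infer_instance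

def pvWitness_map_split_to_original_idx : List Int × Int × (List (Int × Int)) := ([0, 1, -1, -1], 2, [(0, 10), (1, 11), (2, 12), (3, 13)])

-- On inputs where some split entry p is in [-k,-2] with its position a key of new_nodes_to_old
-- (so A does not raise), A's negative list index wraps around and files the node into partition
-- k+p, while B files nodes only under their literal partition number and drops such entries;
-- -1 is the 'removed node' marker here, so wrapping other negatives into an unrelated partition
-- is an indexing artefact and B's behaviour is the intended one.
def D_map_split_to_original_idx (split : List Int) (k : Int) (new_nodes_to_old : List (Int × Int)) : Prop :=
  ∃ ip ∈ PySem.List.enumerate split 0,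
    ip.2 < -1 ∧ -k ≤ ip.2 ∧ (PySem.Dict.ofList new_nodes_to_old).contains ip.1 = true
instance (split : List Int) (k : Int) (new_nodes_to_old : List (Int × Int)) : Decidable (D_map_split_to_original_idx split k new_nodes_to_old) := by unfold D_map_split_to_original_idx; infer_instance

def Spec_map_split_to_original_idx (split : List Int) (k : Int) (new_nodes_to_old : List (Int × Int)) (out : List (List Int)) : Prop := ¬ D_map_split_to_original_idx split k new_nodes_to_old → out = map_split_to_original_idx_alt split k new_nodes_to_old
instance (split : List Int) (k : Int) (new_nodes_to_old : List (Int × Int)) (out : List (List Int)) : Decidable (Spec_map_split_to_original_idx split k new_nodes_to_old out) := by unfold Spec_map_split_to_original_idx; infer_instance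

def pvDiffWitness_map_split_to_original_idx : List Int × Int × (List (Int × Int)) := ([-2, 0], 2, [(0, 5), (1, 7)])
def pvDiffWitnessOut_map_split_to_original_idx : (List (List Int)) × (List (List Int)) := ([[5, 7], []], [[7], []])

-- ===== CLAIM (what is proved, stated in full; the proofs are below) =====
def Claim_unchanged_map_split_to_original_idx : Prop := ∀ (split : List Int) (k : Int) (new_nodes_to_old : List (Int × Int)), Dom_map_split_to_original_idx split k new_nodes_to_old → Pre_map_split_to_original_idx split k new_nodes_to_old → Spec_map_split_to_original_idx split k new_nodes_to_old (map_split_to_original_idx split k new_nodes_to_old)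
def Claim_changed_map_split_to_original_idx : Prop := Dom_map_split_to_original_idx (pvDiffWitness_map_split_to_original_idx.1) (pvDiffWitness_map_split_to_original_idx.2.1) (pvDiffWitness_map_split_to_original_idx.2.2) ∧ Pre_map_split_to_original_idx (pvDiffWitness_map_split_to_original_idx.1) (pvDiffWitness_map_split_to_original_idx.2.1) (pvDiffWitness_map_split_to_original_idx.2.2) ∧ D_map_split_to_original_idx (pvDiffWitness_map_split_to_original_idx.1) (pvDiffWitness_map_split_to_original_idx.2.1) (pvDiffWitness_map_split_to_original_idx.2.2) ∧ map_split_to_original_idx (pvDiffWitness_map_split_to_original_idx.1) (pvDiffWitness_map_split_to_original_idx.2.1) (pvDiffWitness_map_split_to_original_idx.2.2) = pvDiffWitnessOut_map_split_to_original_idx.1 ∧ map_split_to_original_idx_alt (pvDiffWitness_map_split_to_original_idx.1) (pvDiffWitness_map_split_to_original_idx.2.1) (pvDiffWitness_map_split_to_original_idx.2.2) = pvDiffWitnessOut_map_split_to_original_idx.2 ∧ pvDiffWitnessOut_map_split_to_original_idx.1 ≠ pvDiffWitnessOut_map_split_to_original_idx.2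
def Claim_exact_map_split_to_original_idx : Prop := ∀ (split : List Int) (k : Int) (new_nodes_to_old : List (Int × Int)), Dom_map_split_to_original_idx split k new_nodes_to_old → Pre_map_split_to_original_idx split k new_nodes_to_old → D_map_split_to_original_idx split k new_nodes_to_old → map_split_to_original_idx split k new_nodes_to_old ≠ map_split_to_original_idx_alt split k new_nodes_to_old

-- ===== LEMMAS AND PROOFS =====

-- proof-side selector: what B files under `part`
def pvSelB (d : PySem.Dict Int Int) (part : Int) (ip : Int × Int) : Option Int :=
  if ip.2 ≠ -1 ∧ ip.2 = part then d.get? ip.1 else none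

-- B's two comprehensions compose to a single filterMap by pvSelB
lemma pvAltB_char (split : List Int) (k : Int) (nnto : List (Int × Int)) :
    map_split_to_original_idx_alt split k nnto
      = (PySem.List.pyRange 0 k 1).map
          (fun part => (PySem.List.enumerate split 0).filterMap
            (pvSelB (PySem.Dict.ofList nnto) part)) := by
  simp only [map_split_to_original_idx_alt]
  apply List.map_congr_left
  intro part _
  rw [List.filterMap_filterMap]
  apply List.filterMap_congr
  intro ip _
  simp only [pvKeep, pvSelB]
  by_cases hp : ip.2 = -1
  · simp [hp]
  · cases hg : (PySem.Dict.ofList nnto).get? ip.1 <;> by_cases hq : ip.2 = part <;>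
      simp [hp, hq, hg] <;> simp [← hq, hp]

-- proof-side selector characterising what A's dispatch files under `part` (wraparound included)
def pvSelA (d : PySem.Dict Int Int) (k part : Int) (ip : Int × Int) : Option Int :=
  if ip.2 ≠ -1 ∧ (ip.2 = part ∨ ip.2 + k = part) then d.get? ip.1 else none

lemma pvSetD_nonneg {α : Type} (xs : List α) (p : Int) (v : α)
    (h1 : 0 ≤ p) (h2 : p < xs.length) :
    PySem.List.pySetD xs p v = xs.set p.toNat v := by
  simp only [PySem.List.pySetD, PySem.List.pySet?, PySem.List.pyIdx?]
  rw [if_pos h1, if_pos h2]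
  rfl

lemma pvGetD_nonneg {α : Type} (xs : List α) (p : Int) (d : α)
    (h1 : 0 ≤ p) (h2 : p < xs.length) :
    PySem.List.pyGetD xs p d = xs.getD p.toNat d := by
  simp only [PySem.List.pyGetD, PySem.List.pyGet?, PySem.List.pyIdx?]
  rw [if_pos h1, if_pos h2]
  simp [List.getD]

lemma pvSetD_neg {α : Type} (xs : List α) (p : Int) (v : α)
    (h1 : -xs.length ≤ p) (h2 : p < 0) :
    PySem.List.pySetD xs p v = xs.set (xs.length - (-p).toNat) v := by
  simp only [PySem.List.pySetD, PySem.List.pySet?, PySem.List.pyIdx?]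
  rw [if_neg (by omega), if_pos h1]
  rfl

lemma pvGetD_neg {α : Type} (xs : List α) (p : Int) (d : α)
    (h1 : -xs.length ≤ p) (h2 : p < 0) :
    PySem.List.pyGetD xs p d = xs.getD (xs.length - (-p).toNat) d := by
  simp only [PySem.List.pyGetD, PySem.List.pyGet?, PySem.List.pyIdx?]
  rw [if_neg (by omega), if_pos h1]
  simp [List.getD]

-- IndexError in Python: the total pySetD leaves the list unchanged out of range
lemma pvSetD_oor {α : Type} (xs : List α) (p : Int) (v : α)
    (h : p < -xs.length ∨ (xs.length : Int) ≤ p) :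
    PySem.List.pySetD xs p v = xs := by
  simp only [PySem.List.pySetD, PySem.List.pySet?, PySem.List.pyIdx?]
  rcases h with h | h
  · rw [if_neg (by omega), if_neg (by omega)]
    rfl
  · rw [if_pos (by omega), if_neg (by omega)]
    rfl

-- indexing one cell of the range-map bucket list
lemma pvGetD_map_at (k : Int) (f : Int → List Int) (j0 : Nat) (hj : (j0 : Int) < k) :
    ((PySem.List.pyRange 0 k 1).map f).getD j0 [] = f (j0 : Int) := by
  have hlt : j0 < ((PySem.List.pyRange 0 k 1).map f).length := by
    simp [PySem.List.length_pyRange_one]; omega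
  rw [List.getD_eq_getElem _ _ hlt, List.getElem_map, PySem.List.getElem_pyRange_one]
  norm_num

-- setting one cell of the range-map bucket list, in range-map form
lemma pvSet_map_range (k : Int) (f : Int → List Int) (g : Int) (P : Int → Prop)
    [DecidablePred P] (j0 : Nat) (hj : (j0 : Int) < k)
    (hiff : ∀ part : Int, 0 ≤ part → part < k → (P part ↔ part = (j0 : Int))) :
    ((PySem.List.pyRange 0 k 1).map f).set j0 (f (j0 : Int) ++ [g])
      = (PySem.List.pyRange 0 k 1).map (fun part => f part ++ if P part then [g] else []) := by
  apply List.ext_getElem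
  · simp
  · intro j h1 h2
    have hjk : (j : Int) < k := by
      simp [PySem.List.length_pyRange_one] at h2; omega
    rw [List.getElem_set]
    rw [List.getElem_map, List.getElem_map, PySem.List.getElem_pyRange_one]
    by_cases hj' : j0 = j
    · subst hj'
      rw [if_pos rfl, if_pos ((hiff _ (by omega) (by omega)).mpr (by omega)), zero_add]
    · rw [if_neg hj', if_neg (fun hP => hj' (by
        have := (hiff _ (by omega) (by omega)).mp hP; omega))]
      simp

-- one A-step on a bucket list of the range-map shape, in range-map form (in-range index)
lemma pvStepA_map (k p : Int) (f : Int → List Int) (g : Int)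
    (hlo : -k ≤ p) (hhi : p < k) :
    PySem.List.pySetD ((PySem.List.pyRange 0 k 1).map f) p
        (PySem.List.pyGetD ((PySem.List.pyRange 0 k 1).map f) p [] ++ [g])
      = (PySem.List.pyRange 0 k 1).map
          (fun part => f part ++ if p = part ∨ p + k = part then [g] else []) := by
  have hk : (0:Int) < k := by omega
  have hlen : ((PySem.List.pyRange 0 k 1).map f).length = k.toNat := by
    simp [PySem.List.length_pyRange_one]
  by_cases hp : 0 ≤ p
  · have hj : (p.toNat : Int) < k := by omega
    rw [pvSetD_nonneg _ _ _ hp (by omega), pvGetD_nonneg _ _ _ hp (by omega),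
        pvGetD_map_at k f p.toNat hj]
    exact pvSet_map_range k f g _ p.toNat hj (fun part h0 hk' => by constructor <;> (intro h; omega))
  · push_neg at hp
    have hj : ((((PySem.List.pyRange 0 k 1).map f).length - (-p).toNat : Nat) : Int) < k := by
      omega
    rw [pvSetD_neg _ _ _ (by omega) hp, pvGetD_neg _ _ _ (by omega) hp,
        pvGetD_map_at k f _ hj]
    exact pvSet_map_range k f g _ _ hj (fun part h0 hk' => by constructor <;> (intro h; omega))

-- A's whole dispatch loop in range-map form, on every input
lemma pvFoldA_char (d : PySem.Dict Int Int) (k : Int) :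
    ∀ (L : List (Int × Int)) (f : Int → List Int),
    L.foldl (pvStepA d) ((PySem.List.pyRange 0 k 1).map f)
      = (PySem.List.pyRange 0 k 1).map (fun part => f part ++ L.filterMap (pvSelA d k part)) := by
  intro L
  induction L with
  | nil => intro f; simp
  | cons ip L ih =>
    intro f
    obtain ⟨i, p⟩ := ip
    simp only [List.foldl_cons]
    by_cases hp : p = -1
    · rw [show pvStepA d ((PySem.List.pyRange 0 k 1).map f) (i, p)
            = (PySem.List.pyRange 0 k 1).map f from by simp [pvStepA, hp]]
      rw [ih f]
      congr 1
      funext part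
      simp [pvSelA, hp]
    · cases hg : d.get? i with
      | none =>
        rw [show pvStepA d ((PySem.List.pyRange 0 k 1).map f) (i, p)
              = (PySem.List.pyRange 0 k 1).map f from by simp [pvStepA, hp, hg]]
        rw [ih f]
        congr 1
        funext part
        rw [List.filterMap_cons]
        have : pvSelA d k part (i, p) = none := by
          simp only [pvSelA]
          split_ifs <;> simp [hg]
        rw [this]
      | some g =>
        rw [show pvStepA d ((PySem.List.pyRange 0 k 1).map f) (i, p)
              = PySem.List.pySetD ((PySem.List.pyRange 0 k 1).map f) p
                  (PySem.List.pyGetD ((PySem.List.pyRange 0 k 1).map f) p [] ++ [g]) from by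
            simp [pvStepA, hp, hg]]
        by_cases hrange : -k ≤ p ∧ p < k
        · rw [pvStepA_map k p f g hrange.1 hrange.2]
          rw [ih _]
          congr 1
          funext part
          by_cases hc2 : p = part ∨ p + k = part
          · simp [pvSelA, hp, hc2, hg, List.append_assoc]
          · simp [pvSelA, hp, hc2]
        · have hlen : ((PySem.List.pyRange 0 k 1).map f).length = (k - 0).toNat := by
            simp [PySem.List.length_pyRange_one]
          rw [pvSetD_oor _ _ _ (by omega)]
          rw [ih f]
          apply List.map_congr_left
          intro part hpart
          rw [PySem.List.mem_pyRange_one] at hpart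
          rw [List.filterMap_cons]
          have : pvSelA d k part (i, p) = none := by
            simp only [pvSelA]
            rw [if_neg (fun hc => by rcases hc.2 with h | h <;> omega)]
          rw [this]

-- B never files more under one partition index than A does; the difference is at least the
-- number of wrapped entries that A files there
lemma pvLenB_le (d : PySem.Dict Int Int) (k part0 : Int) (h0 : 0 ≤ part0) :
    ∀ (L : List (Int × Int)),
    (L.filterMap (pvSelB d part0)).length
      + L.countP (fun ip => decide (ip.2 < -1) && decide (ip.2 + k = part0) && d.contains ip.1)
      ≤ (L.filterMap (pvSelA d k part0)).length := by
  intro L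
  induction L with
  | nil => simp
  | cons ip L ih =>
    obtain ⟨i, p⟩ := ip
    have step : ∀ (bv : Option Int) (av : Option Int) (cv : Bool),
        pvSelB d part0 (i, p) = bv → pvSelA d k part0 (i, p) = av →
        (decide ((i, p).2 < -1) && decide ((i, p).2 + k = part0) && d.contains (i, p).1) = cv →
        (bv.toList.length + (List.filterMap (pvSelB d part0) L).length)
          + ((if cv then 1 else 0) + L.countP (fun ip => decide (ip.2 < -1) && decide (ip.2 + k = part0) && d.contains ip.1))
          ≤ av.toList.length + (List.filterMap (pvSelA d k part0) L).length →
        (((i, p) :: L).filterMap (pvSelB d part0)).length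
          + ((i, p) :: L).countP (fun ip => decide (ip.2 < -1) && decide (ip.2 + k = part0) && d.contains ip.1)
          ≤ (((i, p) :: L).filterMap (pvSelA d k part0)).length := by
      intro bv av cv hbv hav hcv hle
      rw [List.filterMap_cons, List.filterMap_cons, List.countP_cons, hbv, hav, hcv]
      cases bv <;> cases av <;> cases cv <;> simp at hle ⊢ <;> omega
    by_cases hb : p = part0
    · cases hg : d.get? i with
      | none =>
        refine step none none false (by simp [pvSelB, hb, hg])
          (by simp only [pvSelA]; split_ifs <;> simp [hg])
          (by simp only [Bool.and_eq_false_iff, decide_eq_false_iff_not]; left; left; omega) ?_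
        simpa using ih
      | some g =>
        refine step (some g) (some g) false (by simp only [pvSelB]; rw [if_pos ⟨by omega, hb⟩]; exact hg)
          (by simp only [pvSelA]; rw [if_pos ⟨by omega, Or.inl hb⟩]; exact hg)
          (by simp only [Bool.and_eq_false_iff, decide_eq_false_iff_not]; left; left; omega) ?_
        simp
        omega
    · by_cases hc : p < -1 ∧ p + k = part0 ∧ d.contains i = true
      · obtain ⟨g, hg⟩ : ∃ g, d.get? i = some g := by
          cases hget : d.get? i with
          | none => rw [PySem.Dict.get?_eq_none_iff_contains] at hget; simp_all
          | some g => exact ⟨g, rfl⟩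
        refine step none (some g) true (by simp only [pvSelB]; rw [if_neg (fun hcn => hb hcn.2)])
          (by simp only [pvSelA]; rw [if_pos ⟨by omega, Or.inr hc.2.1⟩]; exact hg)
          (by simp [hc.1, hc.2.1, hc.2.2]) ?_
        simp
        omega
      · cases hav : pvSelA d k part0 (i, p) with
        | none =>
          refine step none none false (by simp only [pvSelB]; rw [if_neg (fun hcn => hb hcn.2)]) hav
            (by simp only [Bool.and_eq_false_iff, decide_eq_false_iff_not]; by_cases h1 : p < -1 <;> by_cases h2 : p + k = part0 <;> simp_all <;> tauto) ?_
          simpa using ih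
        | some g =>
          refine step none (some g) false (by simp only [pvSelB]; rw [if_neg (fun hcn => hb hcn.2)]) hav
            (by simp only [Bool.and_eq_false_iff, decide_eq_false_iff_not]; by_cases h1 : p < -1 <;> by_cases h2 : p + k = part0 <;> simp_all <;> tauto) ?_
          simp
          omega

-- ===== VERDICT (by name: the statement is the Claim_ definition above) =====
theorem map_split_to_original_idx_spec : Claim_unchanged_map_split_to_original_idx := by
  intro split k nnto _dom _hpre hnd
  unfold D_map_split_to_original_idx at hnd
  simp only [map_split_to_original_idx]
  rw [pvFoldA_char (PySem.Dict.ofList nnto) k (PySem.List.enumerate split 0) (fun _ => []),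
      pvAltB_char]
  apply List.map_congr_left
  intro part hpart
  rw [PySem.List.mem_pyRange_one] at hpart
  simp only [List.nil_append]
  apply List.filterMap_congr
  intro ip hip
  simp only [pvSelA, pvSelB]
  by_cases h1 : ip.2 = part
  · rw [if_pos ⟨by omega, Or.inl h1⟩, if_pos ⟨by omega, h1⟩]
  · by_cases hc : ip.2 ≠ -1 ∧ (ip.2 = part ∨ ip.2 + k = part)
    · have hwrap : ip.2 < -1 ∧ -k ≤ ip.2 := by
        rcases hc.2 with h | h
        · exact absurd h h1
        · constructor <;> omega
      have hcontains : (PySem.Dict.ofList nnto).contains ip.1 = false := by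
        by_contra hcon
        exact hnd ⟨ip, hip, hwrap.1, hwrap.2, by simpa using hcon⟩
      rw [if_pos hc, if_neg (fun hcn => h1 hcn.2),
          (PySem.Dict.get?_eq_none_iff_contains _ _).mpr hcontains]
    · rw [if_neg hc, if_neg (fun hcn => h1 hcn.2)]

theorem map_split_to_original_idx_changed : Claim_changed_map_split_to_original_idx := by
  unfold Claim_changed_map_split_to_original_idx; decide

theorem map_split_to_original_idx_tight : Claim_exact_map_split_to_original_idx := by
  intro split k nnto _dom _hpre hd heq
  unfold D_map_split_to_original_idx at hd
  obtain ⟨ip0, hip0, hp0lt, hp0lo, hc⟩ := hd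
  have h0 : 0 ≤ ip0.2 + k := by omega
  have hpk : ip0.2 + k < k := by omega
  simp only [map_split_to_original_idx] at heq
  rw [pvFoldA_char (PySem.Dict.ofList nnto) k (PySem.List.enumerate split 0) (fun _ => []),
      pvAltB_char] at heq
  have hidx := congrArg (fun l => l[(ip0.2 + k).toNat]?) heq
  have hjlen : (ip0.2 + k).toNat < (PySem.List.pyRange 0 k 1).length := by
    rw [PySem.List.length_pyRange_one]; omega
  simp only [List.getElem?_map] at hidx
  rw [List.getElem?_eq_getElem hjlen, PySem.List.getElem_pyRange_one] at hidx
  simp only [Option.map_some, Option.some.injEq, List.nil_append] at hidx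
  have hcast : (0 : Int) + (((ip0.2 + k).toNat : Nat) : Int) = ip0.2 + k := by omega
  rw [hcast] at hidx
  have hlen := pvLenB_le (PySem.Dict.ofList nnto) k (ip0.2 + k) h0 (PySem.List.enumerate split 0)
  have hcnt : 0 < (PySem.List.enumerate split 0).countP
      (fun ip => decide (ip.2 < -1) && decide (ip.2 + k = ip0.2 + k) && (PySem.Dict.ofList nnto).contains ip.1) := by
    rw [List.countP_pos_iff]
    exact ⟨ip0, hip0, by simp [hp0lt, hc]⟩
  rw [hidx] at hlen
  omega
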